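-- pv_equiv track=rewrite | github.com/alejocp00/DAA-Project | Pregunta 3/subuniverses_brute_force.py | exact_set_cover
-- ===== SOURCE A (Python) =====
-- def exact_set_cover(universe, subsets):
--     used_subsets = []
--
--     def backtrack(covered, index):
--         if covered == universe:
--             return True
--         if index >= len(subsets):
--             return False
--
--         for i in range(index, len(subsets)):
--             subset = subsets[i]
--             # Verificamos si el subconjunto no comparte elementos ya cubiertos. Operador & es para la interseccion
--             if not covered & subset:
--                 used_subsets.append(subset)
--                 if backtrack(covered | subset, i + 1): # Operador | es para la union
--                     return True
--                 used_subsets.pop()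
--         return False
--
--     if backtrack(set(), 0):
--         return used_subsets
--     else:
--         return None
-- ===== SOURCE B (Python) =====
-- def exact_set_cover(universe, subsets):
--     n = len(subsets)
--     stack = [(set(), 0, [])]
--     while stack:
--         covered, index, path = stack.pop()
--         if covered == universe:
--             return path
--         if index >= n:
--             continue
--         s = subsets[index]
--         stack.append((covered, index + 1, path))        # branch: skip subsets[index]
--         if not covered & s:
--             stack.append((covered | s, index + 1, path + [s]))  # branch: take it
--     return None
-- ===== Notes on version B (the rewrite author's own statement) =====
-- stated objective: alternative
-- what changed: The recursive backtracker (a for-loop over all remaining candidate indices at each node, mutating a shared used_subsets list) is replaced by an iterative DFS over an explicit stack of (covered, index, path) states with binary take/skip branching per index; the traversal order and hence the returned cover are identical.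
import Mathlib
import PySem

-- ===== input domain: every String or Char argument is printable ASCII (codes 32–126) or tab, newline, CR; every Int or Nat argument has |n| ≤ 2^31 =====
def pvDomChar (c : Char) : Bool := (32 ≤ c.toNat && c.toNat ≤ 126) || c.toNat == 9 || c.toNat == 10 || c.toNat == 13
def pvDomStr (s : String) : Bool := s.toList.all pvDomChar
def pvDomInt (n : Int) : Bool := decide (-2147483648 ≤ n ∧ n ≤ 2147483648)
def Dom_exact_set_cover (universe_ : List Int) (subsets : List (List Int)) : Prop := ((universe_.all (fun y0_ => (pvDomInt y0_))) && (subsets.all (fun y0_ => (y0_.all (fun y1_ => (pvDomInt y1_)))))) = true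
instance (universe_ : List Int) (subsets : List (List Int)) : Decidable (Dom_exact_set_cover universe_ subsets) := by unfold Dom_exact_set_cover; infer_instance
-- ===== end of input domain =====

-- B replaces A's recursive backtracker (a for-loop over candidate indices at each node,
-- with a mutated used_subsets list) by an iterative DFS over an explicit stack of
-- (covered, index, path) states with binary take/skip branching; same traversal order.
-- universe is a Python set (List Int of distinct elements), subsets a list of sets.

-- ===== PORT A =====
-- backtrack(covered, index); 'used' is the threaded used_subsets list (append on entry
-- to a branch, restored by passing the old list on failure = used_subsets.pop()).
-- The for-loop 'for i in range(index, len(subsets))' is transcribed as A_for, a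
-- recursion on the loop variable i with the same bound, body and order.
mutual
def A_bt (universe_ : List Int) (subsets : List (List Int)) (covered : PySem.Set Int) (index : Int) (used : List (List Int)) : Bool × List (List Int) :=
  if PySem.Set.equal covered universe_ then (true, used)
  else if _h : (subsets.length : Int) ≤ index then (false, used)
  else A_for universe_ subsets covered index used
termination_by ((((subsets.length : Int) - index).toNat, 1) : Nat × Nat)
decreasing_by
  exact Prod.Lex.right _ (by omega)

def A_for (universe_ : List Int) (subsets : List (List Int)) (covered : PySem.Set Int) (i : Int) (used : List (List Int)) : Bool × List (List Int) :=
  if h : (subsets.length : Int) ≤ i then (false, used)   -- loop exhausted: return False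
  else
    let subset := PySem.List.pyGetD subsets i []   -- subsets[i]; i is in range here
    if (PySem.Set.inter covered subset).isEmpty then   -- 'not covered & subset'
      match A_bt universe_ subsets (PySem.Set.union covered subset) (i + 1) (used ++ [subset]) with
      | (true, u) => (true, u)
      | (false, _) => A_for universe_ subsets covered (i + 1) used   -- used_subsets.pop()
    else A_for universe_ subsets covered (i + 1) used
termination_by ((((subsets.length : Int) - i).toNat, 0) : Nat × Nat)
decreasing_by
  · exact Prod.Lex.left _ _ (by omega)
  · exact Prod.Lex.left _ _ (by omega)
  · exact Prod.Lex.left _ _ (by omega)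
end

def exact_set_cover (universe_ : List Int) (subsets : List (List Int)) : Option (List (List Int)) :=
  match A_bt universe_ subsets PySem.Set.empty 0 [] with
  | (true, used) => some used   -- 'return used_subsets'
  | (false, _) => none          -- 'return None'

-- ===== PORT B =====
-- termination measure for the explicit-stack DFS: each popped state of index i
-- (cost 3^(n-i)) pushes at most two states of index i+1 (cost 3^(n-i-1) each)
def Bmeasure (n : Nat) (st : List (PySem.Set Int × Int × List (List Int))) : Nat :=
  (st.map (fun e => 3 ^ (((n : Int) - e.2.1).toNat))).sum

def B_loop (universe_ : List Int) (subsets : List (List Int)) (st : List (PySem.Set Int × Int × List (List Int))) : Option (List (List Int)) :=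
  match st with
  | [] => none                                      -- 'while stack' ends: return None
  | (covered, index, path) :: rest =>               -- stack.pop()
    if PySem.Set.equal covered universe_ then some path
    else if (subsets.length : Int) ≤ index then B_loop universe_ subsets rest   -- continue
    else
      let s := PySem.List.pyGetD subsets index []   -- subsets[index]
      let rest' := (covered, index + 1, path) :: rest                -- push the skip branch
      B_loop universe_ subsets
        (if (PySem.Set.inter covered s).isEmpty then
          (PySem.Set.union covered s, index + 1, path ++ [s]) :: rest'   -- push the take branch
         else rest')
termination_by Bmeasure subsets.length st
decreasing_by
  · simp only [Bmeasure, List.map_cons, List.sum_cons]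
    have : 1 ≤ 3 ^ (((subsets.length : Int) - index).toNat) := Nat.one_le_pow _ _ (by omega)
    omega
  · split
    · simp only [Bmeasure, List.map_cons, List.sum_cons]
      have hk : (((subsets.length : Int) - (index + 1)).toNat) + 1 = (((subsets.length : Int) - index).toNat) := by omega
      have h1 : 1 ≤ 3 ^ (((subsets.length : Int) - (index + 1)).toNat) := Nat.one_le_pow _ _ (by omega)
      rw [← hk]
      omega
    · simp only [Bmeasure, List.map_cons, List.sum_cons]
      have hk : (((subsets.length : Int) - (index + 1)).toNat) + 1 = (((subsets.length : Int) - index).toNat) := by omega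
      have h1 : 1 ≤ 3 ^ (((subsets.length : Int) - (index + 1)).toNat) := Nat.one_le_pow _ _ (by omega)
      rw [← hk]
      omega

def exact_set_cover_alt (universe_ : List Int) (subsets : List (List Int)) : Option (List (List Int)) :=
  B_loop universe_ subsets [(PySem.Set.empty, 0, [])]

-- ===== PRECONDITION & SPEC =====
def Spec_exact_set_cover (universe_ : List Int) (subsets : List (List Int)) (out : Option (List (List Int))) : Prop := out = exact_set_cover_alt universe_ subsets
instance (universe_ : List Int) (subsets : List (List Int)) (out : Option (List (List Int))) : Decidable (Spec_exact_set_cover universe_ subsets out) := by unfold Spec_exact_set_cover; infer_instance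

-- ===== CLAIM (what is proved, stated in full; the proofs are below) =====
def Claim_equal_exact_set_cover : Prop := ∀ (universe_ : List Int) (subsets : List (List Int)), Dom_exact_set_cover universe_ subsets → Spec_exact_set_cover universe_ subsets (exact_set_cover universe_ subsets)

-- ===== LEMMAS AND PROOFS =====

-- Popping the state (covered, i, path) behaves like the backtracking call
-- A_bt covered i path: success yields its path, failure falls through to the rest
-- of the stack.  Q is the same statement entered at the for-loop (equal already false).
theorem B_loop_eq_A (universe_ : List Int) (subsets : List (List Int)) :
    ∀ k : Nat,
      (∀ (covered : PySem.Set Int) (i : Int) (used : List (List Int)) (rest : List (PySem.Set Int × Int × List (List Int))),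
        (((subsets.length : Int) - i).toNat) = k →
        PySem.Set.equal covered universe_ = false →
        B_loop universe_ subsets ((covered, i, used) :: rest) =
          (match A_for universe_ subsets covered i used with
            | (true, u) => some u
            | (false, _) => B_loop universe_ subsets rest)) ∧
      (∀ (covered : PySem.Set Int) (index : Int) (used : List (List Int)) (rest : List (PySem.Set Int × Int × List (List Int))),
        (((subsets.length : Int) - index).toNat) = k →
        B_loop universe_ subsets ((covered, index, used) :: rest) =
          (match A_bt universe_ subsets covered index used with
            | (true, u) => some u
            | (false, _) => B_loop universe_ subsets rest)) := by
  intro k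
  induction k using Nat.strong_induction_on with
  | _ k ih =>
    have hQ : ∀ (covered : PySem.Set Int) (i : Int) (used : List (List Int)) (rest : List (PySem.Set Int × Int × List (List Int))),
        (((subsets.length : Int) - i).toNat) = k →
        PySem.Set.equal covered universe_ = false →
        B_loop universe_ subsets ((covered, i, used) :: rest) =
          (match A_for universe_ subsets covered i used with
            | (true, u) => some u
            | (false, _) => B_loop universe_ subsets rest) := by
      intro covered i used rest hk heq
      rw [B_loop, A_for]
      rw [heq]
      simp only [Bool.false_eq_true, if_false]
      by_cases hn : (subsets.length : Int) ≤ i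
      · simp only [hn, dif_pos, if_pos]
      · have hklt : (((subsets.length : Int) - (i + 1)).toNat) < k := by omega
        simp only [hn, dif_neg, if_neg, not_false_iff]
        by_cases hdisj : (PySem.Set.inter covered (PySem.List.pyGetD subsets i [])).isEmpty = true
        · rw [if_pos hdisj, if_pos hdisj]
          -- take branch on top of the stack
          rw [(ih _ hklt).2 (PySem.Set.union covered (PySem.List.pyGetD subsets i []))
                (i + 1) (used ++ [PySem.List.pyGetD subsets i []])
                ((covered, i + 1, used) :: rest) rfl]
          cases hbt : A_bt universe_ subsets (PySem.Set.union covered (PySem.List.pyGetD subsets i []))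
              (i + 1) (used ++ [PySem.List.pyGetD subsets i []]) with
          | mk b u =>
            cases b with
            | true => rfl
            | false =>
              -- failure: continue with the skip state, which is A_for at i+1
              have := (ih _ hklt).1 covered (i + 1) used rest rfl heq
              rw [this]
        · rw [if_neg hdisj, if_neg hdisj]
          exact (ih _ hklt).1 covered (i + 1) used rest rfl heq
    refine ⟨hQ, ?_⟩
    intro covered index used rest hk
    rw [B_loop, A_bt]
    by_cases heq : PySem.Set.equal covered universe_ = true
    · rw [heq]; simp only [if_pos]
    · have heq' : PySem.Set.equal covered universe_ = false := by
        cases h : PySem.Set.equal covered universe_ with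
        | true => exact absurd h heq
        | false => rfl
      rw [heq']
      simp only [Bool.false_eq_true, if_false]
      by_cases hn : (subsets.length : Int) ≤ index
      · simp only [hn, dif_pos, if_pos]
      · simp only [hn, dif_neg, if_neg, not_false_iff]
        have := hQ covered index used rest hk heq'
        rw [B_loop, heq'] at this
        simp only [Bool.false_eq_true, hn, if_neg, not_false_iff] at this
        exact this

-- ===== VERDICT (by name: the statement is the Claim_ definition above) =====
theorem exact_set_cover_spec : Claim_equal_exact_set_cover := by
  intro universe_ subsets _
  show exact_set_cover universe_ subsets = exact_set_cover_alt universe_ subsets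
  unfold exact_set_cover exact_set_cover_alt
  rw [(B_loop_eq_A universe_ subsets (((subsets.length : Int) - 0).toNat)).2
        PySem.Set.empty 0 [] [] rfl]
  cases hbt : A_bt universe_ subsets PySem.Set.empty 0 [] with
  | mk b u => cases b with
    | true => rfl
    | false => simp [B_loop]
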